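-- pv_equiv track=rewrite | github.com/malue-ai/dazee-small | scripts/run_eval.py | sse_lifecycle_order
-- ===== SOURCE A (Python) =====
-- from typing import Any, Dict, List, Optional, Tuple
--
-- def sse_lifecycle_order(events: List[Dict]) -> Tuple[bool, str]:
--     """Verify events follow: message_start -> content_* -> message_stop."""
--     ordered_types = [e.get("type") for e in events if e.get("type")]
--     key_events = []
--     for t in ordered_types:
--         if t in ("message_start", "content_start", "content_delta",
--                  "content_stop", "message_stop"):
--             key_events.append(t)
--
--     if not key_events:
--         return False, "no lifecycle events found"
--
--     # message_start must come before any content event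
--     if "message_start" in key_events:
--         ms_idx = key_events.index("message_start")
--         content_indices = [i for i, t in enumerate(key_events) if t.startswith("content_")]
--         if content_indices and min(content_indices) < ms_idx:
--             return False, "content event before message_start"
--
--     # message_stop must come after all content events
--     if "message_stop" in key_events:
--         stop_idx = key_events.index("message_stop")
--         content_indices = [i for i, t in enumerate(key_events) if t.startswith("content_")]
--         if content_indices and max(content_indices) > stop_idx:
--             return False, "content event after message_stop"
--
--     return True, ""
-- ===== SOURCE B (Python) =====
-- def sse_lifecycle_order(events):
--     """Verify events follow: message_start -> content_* -> message_stop."""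
--     KEY = ("message_start", "content_start", "content_delta",
--            "content_stop", "message_stop")
--     any_key = False
--     seen_start = False
--     seen_stop = False
--     content_before = False
--     content_after = False
--     for e in events:
--         t = e.get("type")
--         if not t or t not in KEY:
--             continue
--         any_key = True
--         if t == "message_start":
--             seen_start = True
--         elif t == "message_stop":
--             seen_stop = True
--         else:  # one of the content_* events
--             if not seen_start:
--                 content_before = True
--             if seen_stop:
--                 content_after = True
--     if not any_key:
--         return False, "no lifecycle events found"
--     if seen_start and content_before:
--         return False, "content event before message_start"
--     if content_after:
--         return False, "content event after message_stop"
--     return True, ""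
-- ===== Notes on version B (the rewrite author's own statement) =====
-- stated objective: alternative
-- what changed: Replaced the multi-pass analysis (build key_events, then membership tests, .index, and min/max over enumerate-filtered content indices) by a single forward state-machine pass over the events maintaining seen_start/seen_stop/content_before/content_after flags, with the same error priority.
import Mathlib
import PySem

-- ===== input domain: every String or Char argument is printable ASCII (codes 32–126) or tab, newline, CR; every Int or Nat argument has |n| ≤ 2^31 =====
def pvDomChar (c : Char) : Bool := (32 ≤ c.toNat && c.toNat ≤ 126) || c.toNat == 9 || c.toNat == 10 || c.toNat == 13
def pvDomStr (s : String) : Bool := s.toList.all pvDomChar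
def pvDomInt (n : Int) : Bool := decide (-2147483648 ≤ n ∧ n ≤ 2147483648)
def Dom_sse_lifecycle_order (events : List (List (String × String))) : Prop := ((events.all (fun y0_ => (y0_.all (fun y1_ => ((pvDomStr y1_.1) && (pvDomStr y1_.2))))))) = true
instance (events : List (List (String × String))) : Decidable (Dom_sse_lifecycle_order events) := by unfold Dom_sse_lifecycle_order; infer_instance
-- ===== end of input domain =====

-- B replaces A's multi-pass index/min/max analysis by one forward state-machine pass (alternative, same cost).

-- ===== PORT A =====
def pvKeyA : List String :=
  ["message_start", "content_start", "content_delta", "content_stop", "message_stop"]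

-- content_indices = [i for i, t in enumerate(key_events) if t.startswith("content_")]
def pvContentIdxA (key_events : List String) : List Int :=
  ((PySem.List.enumerate key_events).filter (fun p => PySem.Str.startswith p.2 "content_")).map (fun p => p.1)

def sse_lifecycle_order (events : List (List (String × String))) : Bool × String :=
  let ordered_types : List String :=
    events.filterMap (fun e =>
      match PySem.Dict.get? (PySem.Dict.mk e) "type" with
      | some t => if t ≠ "" then some t else none
      | none => none)
  let key_events : List String :=
    ordered_types.foldl (fun acc t => if t ∈ pvKeyA then acc ++ [t] else acc) []
  if key_events = [] then (false, "no lifecycle events found")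
  else if "message_start" ∈ key_events ∧
          pvContentIdxA key_events ≠ [] ∧
          (PySem.List.min? (pvContentIdxA key_events) (fun x => x)).getD 0 <
            (((PySem.List.index? key_events "message_start").getD 0 : Nat) : Int) then
    (false, "content event before message_start")
  else if "message_stop" ∈ key_events ∧
          pvContentIdxA key_events ≠ [] ∧
          (((PySem.List.index? key_events "message_stop").getD 0 : Nat) : Int) <
            (PySem.List.max? (pvContentIdxA key_events) (fun x => x)).getD 0 then
    (false, "content event after message_stop")
  else (true, "")

-- ===== PORT B =====
def pvKeyB : List String :=
  ["message_start", "content_start", "content_delta", "content_stop", "message_stop"]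

-- one loop step: state = (any_key, seen_start, seen_stop, content_before, content_after)
def pvStepB (s : Bool × Bool × Bool × Bool × Bool) (e : List (String × String)) :
    Bool × Bool × Bool × Bool × Bool :=
  match PySem.Dict.get? (PySem.Dict.mk e) "type" with
  | none => s
  | some t =>
    if t = "" ∨ t ∉ pvKeyB then s
    else
      match s with
      | (_, seen_start, seen_stop, content_before, content_after) =>
        if t = "message_start" then (true, true, seen_stop, content_before, content_after)
        else if t = "message_stop" then (true, seen_start, true, content_before, content_after)
        else (true, seen_start, seen_stop, content_before || !seen_start, content_after || seen_stop)

def sse_lifecycle_order_alt (events : List (List (String × String))) : Bool × String :=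
  match events.foldl pvStepB (false, false, false, false, false) with
  | (any_key, seen_start, _, content_before, content_after) =>
    if !any_key then (false, "no lifecycle events found")
    else if seen_start && content_before then (false, "content event before message_start")
    else if content_after then (false, "content event after message_stop")
    else (true, "")

-- ===== PRECONDITION & SPEC =====
def Spec_sse_lifecycle_order (events : List (List (String × String))) (out : Bool × String) : Prop := out = sse_lifecycle_order_alt events
instance (events : List (List (String × String))) (out : Bool × String) : Decidable (Spec_sse_lifecycle_order events out) := by unfold Spec_sse_lifecycle_order; infer_instance

-- ===== CLAIM (what is proved, stated in full; the proofs are below) =====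
def Claim_equal_sse_lifecycle_order : Prop := ∀ (events : List (List (String × String))), Dom_sse_lifecycle_order events → Spec_sse_lifecycle_order events (sse_lifecycle_order events)

-- ===== LEMMAS AND PROOFS =====

-- "content-ish" among key events: any key event other than message_start / message_stop
def pvIsC (t : String) : Bool := !(t == "message_start") && !(t == "message_stop")

-- content-ish event occurring before the first message_start (unconditionally flagged)
def pvCB : List String → Bool
  | [] => false
  | t :: r => if t = "message_start" then false
              else if t = "message_stop" then pvCB r else true

-- content-ish event occurring strictly after the first message_stop
def pvCA : List String → Bool
  | [] => false
  | t :: r => if t = "message_stop" then r.any pvIsC else pvCA r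

-- B's loop body specialised to a type t that passed the key filter
def pvCore (s : Bool × Bool × Bool × Bool × Bool) (t : String) :
    Bool × Bool × Bool × Bool × Bool :=
  match s with
  | (_, seen_start, seen_stop, content_before, content_after) =>
    if t = "message_start" then (true, true, seen_stop, content_before, content_after)
    else if t = "message_stop" then (true, seen_start, true, content_before, content_after)
    else (true, seen_start, seen_stop, content_before || !seen_start, content_after || seen_stop)

def pvTypeOf (e : List (String × String)) : Option String :=
  match PySem.Dict.get? (PySem.Dict.mk e) "type" with
  | some t => if t ≠ "" then some t else none
  | none => none

def pvKeys (events : List (List (String × String))) : List String :=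
  (events.filterMap pvTypeOf).filter (fun t => decide (t ∈ pvKeyA))

-- content-index list with the content test written as pvIsC
def pvCIc (l : List String) : List Int :=
  ((PySem.List.enumerate l).filter (fun p => pvIsC p.2)).map (fun p => p.1)

lemma pvCA_imp_any {l : List String} (h : pvCA l = true) : l.any pvIsC = true := by
  induction l with
  | nil => simp [pvCA] at h
  | cons t r ih =>
    by_cases ht : t = "message_stop"
    · simp [pvCA, ht] at h; simp [List.any_cons, h]
    · simp [pvCA, ht] at h; simp [List.any_cons, ih h]

lemma pvCA_imp_mem {l : List String} (h : pvCA l = true) : "message_stop" ∈ l := by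
  induction l with
  | nil => simp [pvCA] at h
  | cons t r ih =>
    by_cases ht : t = "message_stop"
    · simp [ht]
    · simp [pvCA, ht] at h; exact List.mem_cons_of_mem _ (ih h)

lemma pvFoldB_eq_core (events : List (List (String × String))) :
    ∀ s, events.foldl pvStepB s = (pvKeys events).foldl pvCore s := by
  induction events with
  | nil => intro s; simp [pvKeys]
  | cons e es ih =>
    intro s
    simp only [List.foldl_cons, pvKeys, List.filterMap_cons]
    cases hg : pvTypeOf e with
    | none =>
      have hstep : pvStepB s e = s := by
        unfold pvStepB
        unfold pvTypeOf at hg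
        cases hget : PySem.Dict.get? (PySem.Dict.mk e) "type" with
        | none => simp
        | some t =>
          simp only [hget] at hg ⊢
          by_cases ht : t = ""
          · simp [ht]
          · simp [ht] at hg
      rw [hstep, ih s]; rfl
    | some t =>
      have hget : PySem.Dict.get? (PySem.Dict.mk e) "type" = some t ∧ t ≠ "" := by
        unfold pvTypeOf at hg
        cases hget : PySem.Dict.get? (PySem.Dict.mk e) "type" with
        | none => simp [hget] at hg
        | some u =>
          simp only [hget] at hg
          by_cases hu : u = ""
          · simp [hu] at hg
          · simp [hu] at hg; exact ⟨by simpa [hg] using hget, hg ▸ hu⟩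
      by_cases hk : t ∈ pvKeyA
      · have hstep : pvStepB s e = pvCore s t := by
          unfold pvStepB pvCore
          rw [hget.1]
          have : ¬ (t = "" ∨ t ∉ pvKeyB) := by
            push_neg; exact ⟨hget.2, by simpa [pvKeyB, pvKeyA] using hk⟩
          simp only [if_neg this]
        rw [hstep, ih (pvCore s t)]
        simp [List.filter_cons, hk, pvKeys]
      · have hstep : pvStepB s e = s := by
          unfold pvStepB
          rw [hget.1]
          have : t = "" ∨ t ∉ pvKeyB := Or.inr (by simpa [pvKeyB, pvKeyA] using hk)
          simp only [if_pos this]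
        rw [hstep, ih s]
        simp [List.filter_cons, hk, pvKeys]

lemma pvFoldChar (l : List String) :
    ∀ a b c d e : Bool,
      l.foldl pvCore (a, b, c, d, e) =
        (a || !l.isEmpty,
         b || decide ("message_start" ∈ l),
         c || decide ("message_stop" ∈ l),
         d || (!b && pvCB l),
         e || (c && l.any pvIsC) || pvCA l) := by
  induction l with
  | nil => intro a b c d e; simp [pvCB, pvCA]
  | cons t r ih =>
    intro a b c d e
    rw [List.foldl_cons]
    by_cases h1 : t = "message_start"
    · subst h1
      have hstep : pvCore (a, b, c, d, e) "message_start" = (true, true, c, d, e) := rfl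
      rw [hstep, ih]
      have h4 : pvCB ("message_start" :: r) = false := rfl
      have h5 : (("message_start" :: r).any pvIsC) = r.any pvIsC := by
        simp [List.any_cons, pvIsC]
      have h6 : pvCA ("message_start" :: r) = pvCA r := rfl
      rw [h4, h5, h6]
      simp only [Prod.mk.injEq, List.isEmpty_cons, List.mem_cons]
      refine ⟨by simp, by simp, by simp, by cases b <;> simp, by simp⟩
    · by_cases h2 : t = "message_stop"
      · subst h2
        have hstep : pvCore (a, b, c, d, e) "message_stop" = (true, b, true, d, e) := rfl
        rw [hstep, ih]
        have h4 : pvCB ("message_stop" :: r) = pvCB r := rfl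
        have h5 : (("message_stop" :: r).any pvIsC) = r.any pvIsC := by
          simp [List.any_cons, pvIsC]
        have h6 : pvCA ("message_stop" :: r) = r.any pvIsC := rfl
        rw [h4, h5, h6]
        simp only [Prod.mk.injEq, List.isEmpty_cons, List.mem_cons]
        refine ⟨by simp, by simp [Ne.symm h1], by simp, by cases b <;> cases d <;> simp, ?_⟩
        cases hca : pvCA r with
        | true =>
          have hany := pvCA_imp_any hca
          simp [hany]
        | false =>
          cases hany : r.any pvIsC <;> cases c <;> cases e <;> simp [hany, hca]
      · have hc : pvIsC t = true := by simp [pvIsC, h1, h2]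
        have hstep : pvCore (a, b, c, d, e) t = (true, b, c, d || !b, e || c) := by
          simp [pvCore, h1, h2]
        rw [hstep, ih]
        have h4 : pvCB (t :: r) = true := by simp [pvCB, h1, h2]
        have h5 : ((t :: r).any pvIsC) = true := by simp [List.any_cons, hc]
        have h6 : pvCA (t :: r) = pvCA r := by simp [pvCA, h2]
        rw [h4, h5, h6]
        simp only [Prod.mk.injEq, List.isEmpty_cons, List.mem_cons]
        refine ⟨by simp, by simp [Ne.symm h1], by simp [Ne.symm h2],
          by cases b <;> cases d <;> simp, ?_⟩
        cases c <;> cases e <;> simp [Bool.or_assoc]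

lemma pvMemCIc {l : List String} {x : Int} :
    x ∈ pvCIc l ↔ ∃ (j : Nat) (h : j < l.length), x = (j : Int) ∧ pvIsC l[j] = true := by
  unfold pvCIc
  simp only [List.mem_map, List.mem_filter, PySem.List.mem_enumerate_iff]
  constructor
  · rintro ⟨p, ⟨⟨k, hk, rfl⟩, hC⟩, rfl⟩
    exact ⟨k, hk, by simp, by simpa using hC⟩
  · rintro ⟨j, hj, rfl, hC⟩
    exact ⟨((j : Int), l[j]), ⟨⟨j, hj, by simp⟩, by simpa using hC⟩, rfl⟩

lemma pvCB_split {pre suf : List String} (h : "message_start" ∉ pre) :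
    pvCB (pre ++ "message_start" :: suf) = pre.any pvIsC := by
  induction pre with
  | nil => simp [pvCB]
  | cons t p ih =>
    simp only [List.mem_cons, not_or] at h
    by_cases h2 : t = "message_stop"
    · simp [pvCB, h2, ih h.2, List.any_cons, pvIsC]
    · simp [pvCB, Ne.symm h.1, h.1, h2, List.any_cons, pvIsC]

lemma pvCA_split {pre suf : List String} (h : "message_stop" ∉ pre) :
    pvCA (pre ++ "message_stop" :: suf) = suf.any pvIsC := by
  induction pre with
  | nil => simp [pvCA]
  | cons t p ih =>
    simp only [List.mem_cons, not_or] at h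
    have ht : ¬ t = "message_stop" := fun hh => h.1 hh.symm
    simp [pvCA, ht, ih h.2]

lemma pvCIA_eq_CIc {l : List String} (hK : ∀ t ∈ l, t ∈ pvKeyA) :
    pvContentIdxA l = pvCIc l := by
  unfold pvContentIdxA pvCIc
  congr 1
  apply List.filter_congr
  intro p hp
  rw [PySem.List.mem_enumerate_iff] at hp
  obtain ⟨k, hk, rfl⟩ := hp
  have hmem : l[k] ∈ l := List.getElem_mem hk
  have hfact : ∀ u ∈ pvKeyA, PySem.Str.startswith u "content_" = pvIsC u := by decide
  exact hfact _ (hK _ hmem)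

lemma pvBeforeIff {l : List String} (hms : "message_start" ∈ l) :
    (pvCIc l ≠ [] ∧
      (PySem.List.min? (pvCIc l) (fun x => x)).getD 0 <
        (((PySem.List.index? l "message_start").getD 0 : Nat) : Int)) ↔ pvCB l = true := by
  obtain ⟨k, hk⟩ : ∃ k, PySem.List.index? l "message_start" = some k := by
    have := (PySem.List.index?_isSome_iff (xs := l) (v := "message_start")).2 hms
    exact Option.isSome_iff_exists.1 this
  rcases (PySem.List.index?_eq_some_iff _ _ _).1 hk with ⟨pre, suf, rfl, hlen, hpre⟩
  rw [pvCB_split hpre, hk]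
  constructor
  · rintro ⟨hne, hlt⟩
    obtain ⟨m, hm⟩ : ∃ m, PySem.List.min? (pvCIc (pre ++ "message_start" :: suf)) (fun x => x) = some m := by
      have : ¬ (PySem.List.min? (pvCIc (pre ++ "message_start" :: suf)) (fun x => x) = none) := by
        rw [PySem.List.min?_eq_none_iff]; exact hne
      exact Option.ne_none_iff_exists'.1 this
    rw [hm] at hlt
    simp only [Option.getD_some] at hlt
    rcases pvMemCIc.1 (PySem.List.min?_mem hm) with ⟨j, hj, rfl, hC⟩
    have hjk : j < k := by exact_mod_cast hlt
    have hjpre : j < pre.length := by omega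
    have : (pre ++ "message_start" :: suf)[j] = pre[j] := List.getElem_append_left hjpre
    rw [List.any_eq_true]
    exact ⟨pre[j], List.getElem_mem hjpre, by rw [← this]; exact hC⟩
  · intro hany
    rcases List.any_eq_true.1 hany with ⟨x, hx, hxC⟩
    rcases List.mem_iff_getElem.1 hx with ⟨j, hj, rfl⟩
    have hjl : j < (pre ++ "message_start" :: suf).length := by
      simp [List.length_append]; omega
    have hgetj : (pre ++ "message_start" :: suf)[j] = pre[j] := List.getElem_append_left hj
    have hmemj : ((j : Int)) ∈ pvCIc (pre ++ "message_start" :: suf) :=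
      pvMemCIc.2 ⟨j, hjl, rfl, by rw [hgetj]; exact hxC⟩
    have hne : pvCIc (pre ++ "message_start" :: suf) ≠ [] := List.ne_nil_of_mem hmemj
    refine ⟨hne, ?_⟩
    obtain ⟨m, hm⟩ : ∃ m, PySem.List.min? (pvCIc (pre ++ "message_start" :: suf)) (fun x => x) = some m := by
      have : ¬ (PySem.List.min? (pvCIc (pre ++ "message_start" :: suf)) (fun x => x) = none) := by
        rw [PySem.List.min?_eq_none_iff]; exact hne
      exact Option.ne_none_iff_exists'.1 this
    rw [hm]
    simp only [Option.getD_some]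
    have hle : m ≤ (j : Int) := PySem.List.min?_isMin hm _ hmemj
    have : (j : Int) < (k : Int) := by exact_mod_cast (by omega : j < k)
    omega

lemma pvAfterIff {l : List String} (hms : "message_stop" ∈ l) :
    (pvCIc l ≠ [] ∧
      (((PySem.List.index? l "message_stop").getD 0 : Nat) : Int) <
        (PySem.List.max? (pvCIc l) (fun x => x)).getD 0) ↔ pvCA l = true := by
  obtain ⟨k, hk⟩ : ∃ k, PySem.List.index? l "message_stop" = some k := by
    have := (PySem.List.index?_isSome_iff (xs := l) (v := "message_stop")).2 hms
    exact Option.isSome_iff_exists.1 this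
  rcases (PySem.List.index?_eq_some_iff _ _ _).1 hk with ⟨pre, suf, rfl, hlen, hpre⟩
  rw [pvCA_split hpre, hk]
  constructor
  · rintro ⟨hne, hlt⟩
    obtain ⟨m, hm⟩ : ∃ m, PySem.List.max? (pvCIc (pre ++ "message_stop" :: suf)) (fun x => x) = some m := by
      have : ¬ (PySem.List.max? (pvCIc (pre ++ "message_stop" :: suf)) (fun x => x) = none) := by
        rw [PySem.List.max?_eq_none_iff]; exact hne
      exact Option.ne_none_iff_exists'.1 this
    rw [hm] at hlt
    simp only [Option.getD_some] at hlt
    rcases pvMemCIc.1 (PySem.List.max?_mem hm) with ⟨j, hj, rfl, hC⟩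
    have hjk : k < j := by exact_mod_cast hlt
    have hjsuf : j - (k + 1) < suf.length := by
      simp [List.length_append] at hj; omega
    have hget : (pre ++ "message_stop" :: suf)[j] = suf[j - (k + 1)] := by
      rw [List.getElem_append_right (by omega)]
      have : j - pre.length = (j - (k + 1)) + 1 := by omega
      simp [this]
    rw [List.any_eq_true]
    exact ⟨suf[j - (k + 1)], List.getElem_mem hjsuf, by rw [← hget]; exact hC⟩
  · intro hany
    rcases List.any_eq_true.1 hany with ⟨x, hx, hxC⟩
    rcases List.mem_iff_getElem.1 hx with ⟨i, hi, rfl⟩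
    have hjl : k + 1 + i < (pre ++ "message_stop" :: suf).length := by
      simp [List.length_append]; omega
    have hget : (pre ++ "message_stop" :: suf)[k + 1 + i] = suf[i] := by
      rw [List.getElem_append_right (by omega)]
      have : k + 1 + i - pre.length = i + 1 := by omega
      simp [this]
    have hmemj : (((k + 1 + i : Nat)) : Int) ∈ pvCIc (pre ++ "message_stop" :: suf) :=
      pvMemCIc.2 ⟨k + 1 + i, hjl, rfl, by rw [hget]; exact hxC⟩
    have hne : pvCIc (pre ++ "message_stop" :: suf) ≠ [] := List.ne_nil_of_mem hmemj
    refine ⟨hne, ?_⟩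
    obtain ⟨m, hm⟩ : ∃ m, PySem.List.max? (pvCIc (pre ++ "message_stop" :: suf)) (fun x => x) = some m := by
      have : ¬ (PySem.List.max? (pvCIc (pre ++ "message_stop" :: suf)) (fun x => x) = none) := by
        rw [PySem.List.max?_eq_none_iff]; exact hne
      exact Option.ne_none_iff_exists'.1 this
    rw [hm]
    simp only [Option.getD_some]
    have hle : ((k + 1 + i : Nat) : Int) ≤ m := PySem.List.max?_isMax hm _ hmemj
    have : (k : Int) < ((k + 1 + i : Nat) : Int) := by push_cast; omega
    omega

-- ===== VERDICT (by name: the statement is the Claim_ definition above) =====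
set_option maxRecDepth 4096 in
theorem sse_lifecycle_order_spec : Claim_equal_sse_lifecycle_order := by
  intro events _
  unfold Spec_sse_lifecycle_order
  unfold sse_lifecycle_order sse_lifecycle_order_alt
  rw [pvFoldB_eq_core]
  simp only []
  rw [PySem.List.foldl_append_ite_eq_filter]
  simp only [List.nil_append]
  set K : List String :=
    (events.filterMap (fun e =>
      match PySem.Dict.get? (PySem.Dict.mk e) "type" with
      | some t => if t ≠ "" then some t else none
      | none => none)).filter (fun t => decide (t ∈ pvKeyA)) with hKdef
  have hKeys : pvKeys events = K := by
    unfold pvKeys pvTypeOf; rw [hKdef]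
  rw [hKeys, pvFoldChar]
  have hK : ∀ t ∈ K, t ∈ pvKeyA := by
    intro t ht
    rw [hKdef] at ht
    have := List.of_mem_filter ht
    simpa using this
  clear_value K
  clear hKdef
  simp only [Bool.false_or, Bool.false_and, Bool.not_false, Bool.true_and, Bool.or_false,
    List.nil_append, pvCIA_eq_CIc hK]
  by_cases hnil : K = []
  · simp [hnil]
  · have hE : (!K.isEmpty) = true := by
      simp [List.isEmpty_iff, hnil]
    rw [if_neg hnil, hE]
    simp only [Bool.not_true, Bool.false_eq_true, if_false]
    by_cases hms : "message_start" ∈ K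
    · by_cases hcb : pvCB K = true
      · have hA : "message_start" ∈ K ∧ pvCIc K ≠ [] ∧
            (PySem.List.min? (pvCIc K) (fun x => x)).getD 0 <
              (((PySem.List.index? K "message_start").getD 0 : Nat) : Int) :=
          ⟨hms, (pvBeforeIff hms).2 hcb⟩
        rw [if_pos hA]
        have hBt : (decide ("message_start" ∈ K) && pvCB K) = true := by
          rw [hcb, Bool.and_true, decide_eq_true_eq]; exact hms
        rw [hBt]
        rw [if_pos rfl]
      · have hA : ¬ ("message_start" ∈ K ∧ pvCIc K ≠ [] ∧
            (PySem.List.min? (pvCIc K) (fun x => x)).getD 0 <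
              (((PySem.List.index? K "message_start").getD 0 : Nat) : Int)) := by
          rintro ⟨_, h2, h3⟩
          exact hcb ((pvBeforeIff hms).1 ⟨h2, h3⟩)
        rw [if_neg hA]
        have hB : (decide ("message_start" ∈ K) && pvCB K) = false := by
          cases h : pvCB K
          · exact Bool.and_false _
          · exact absurd h hcb
        rw [hB]
        simp only [Bool.false_eq_true, if_false]
        by_cases hstp : "message_stop" ∈ K
        · by_cases hca : pvCA K = true
          · have hA2 : "message_stop" ∈ K ∧ pvCIc K ≠ [] ∧
                (((PySem.List.index? K "message_stop").getD 0 : Nat) : Int) <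
                  (PySem.List.max? (pvCIc K) (fun x => x)).getD 0 :=
              ⟨hstp, (pvAfterIff hstp).2 hca⟩
            rw [if_pos hA2, hca]
            simp
          · have hA2 : ¬ ("message_stop" ∈ K ∧ pvCIc K ≠ [] ∧
                (((PySem.List.index? K "message_stop").getD 0 : Nat) : Int) <
                  (PySem.List.max? (pvCIc K) (fun x => x)).getD 0) := by
              rintro ⟨_, h2, h3⟩
              exact hca ((pvAfterIff hstp).1 ⟨h2, h3⟩)
            rw [if_neg hA2]
            have hcaf : pvCA K = false := by
              cases h : pvCA K
              · rfl
              · exact absurd h hca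
            rw [hcaf]
            simp
        · have hca : pvCA K = false := by
            cases h : pvCA K
            · rfl
            · exact absurd (pvCA_imp_mem h) hstp
          have hA2 : ¬ ("message_stop" ∈ K ∧ pvCIc K ≠ [] ∧
              (((PySem.List.index? K "message_stop").getD 0 : Nat) : Int) <
                (PySem.List.max? (pvCIc K) (fun x => x)).getD 0) := by
            rintro ⟨h1, _⟩; exact hstp h1
          rw [if_neg hA2]
          simp [hca]
    · -- no message_start: first branch of A false, B's ss && cb = false
      have hA : ¬ ("message_start" ∈ K ∧ pvCIc K ≠ [] ∧
          (PySem.List.min? (pvCIc K) (fun x => x)).getD 0 <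
            (((PySem.List.index? K "message_start").getD 0 : Nat) : Int)) := by
        rintro ⟨h1, _⟩; exact hms h1
      rw [if_neg hA]
      have hB : (decide ("message_start" ∈ K) && pvCB K) = false := by
        simp [hms]
      rw [hB]
      simp only [Bool.false_eq_true, if_false]
      by_cases hstp : "message_stop" ∈ K
      · by_cases hca : pvCA K = true
        · have hA2 : "message_stop" ∈ K ∧ pvCIc K ≠ [] ∧
              (((PySem.List.index? K "message_stop").getD 0 : Nat) : Int) <
                (PySem.List.max? (pvCIc K) (fun x => x)).getD 0 :=
            ⟨hstp, (pvAfterIff hstp).2 hca⟩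
          rw [if_pos hA2, hca]
          simp
        · have hA2 : ¬ ("message_stop" ∈ K ∧ pvCIc K ≠ [] ∧
              (((PySem.List.index? K "message_stop").getD 0 : Nat) : Int) <
                (PySem.List.max? (pvCIc K) (fun x => x)).getD 0) := by
            rintro ⟨_, h2, h3⟩
            exact hca ((pvAfterIff hstp).1 ⟨h2, h3⟩)
          rw [if_neg hA2]
          have hcaf : pvCA K = false := by
            cases h : pvCA K
            · rfl
            · exact absurd h hca
          rw [hcaf]
          simp
      · have hca : pvCA K = false := by
          cases h : pvCA K
          · rfl
          · exact absurd (pvCA_imp_mem h) hstp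
        have hA2 : ¬ ("message_stop" ∈ K ∧ pvCIc K ≠ [] ∧
            (((PySem.List.index? K "message_stop").getD 0 : Nat) : Int) <
              (PySem.List.max? (pvCIc K) (fun x => x)).getD 0) := by
          rintro ⟨h1, _⟩; exact hstp h1
        rw [if_neg hA2]
        simp [hca]
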